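-- pv_equiv track=rewrite | github.com/romeorizzi/TALight | example_problems/tutorial/lcs/services/lcs_lib.py | instance_to_dat_str
-- ===== SOURCE A (Python) =====
-- AVAILABLE_FORMATS = {'instance':{'only_strings':'only_strings.txt', 'with_m_and_n':'with_m_and_n.txt', 'gmpl_dat':'dat'},'solution':{'subseq':'subseq.txt', 'annotated_subseq':'annotated_subseq.txt'}}
--
-- def instance_to_dat_str(instance, format_name=''):
--     """Of the given <instance>, this function returns the .dat string in format <format_name>"""
--     assert format_name in AVAILABLE_FORMATS['instance'], f'Format_name `{format_name}` unsupported for objects of category `instance`.'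
--     M = len(instance[0])
--     N = len(instance[1])
--     output = f"param M := {M};  # Number of characters of the first string s\n"
--     output += f"param N := {N};  # Number of characters of the second string t\n"
--     output += "param: STRINGS: S_STRING    T_STRING :=\n"
--     for j in range(max(M, N)):
--         if j < M and j < N:
--             output += f'            {j+1} {instance[0][j]}             {instance[1][j]}\n'
--         elif j >= M:
--             output += f'            {j+1} .               {instance[1][j]}\n'
--         elif j >= N:
--             output += f'            {j+1} {instance[0][j]}             .\n'
--     output = output[:-1] + ";\nend;"
--     return output
-- ===== SOURCE B (Python) =====
-- AVAILABLE_FORMATS = {'instance':{'only_strings':'only_strings.txt', 'with_m_and_n':'with_m_and_n.txt', 'gmpl_dat':'dat'},'solution':{'subseq':'subseq.txt', 'annotated_subseq':'annotated_subseq.txt'}}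
--
-- def _rows(j, s, t):
--     """Recursively destructure both strings together: one newline-terminated row
--     per step until both are exhausted; no indices or length tests."""
--     if not s and not t:
--         return ''
--     if s and t:
--         line = f'            {j} {s[0]}             {t[0]}\n'
--     elif s:
--         line = f'            {j} {s[0]}             .\n'
--     else:
--         line = f'            {j} .               {t[0]}\n'
--     return line + _rows(j + 1, s[1:], t[1:])
--
-- def instance_to_dat_str(instance, format_name=''):
--     """Of the given <instance>, this function returns the .dat string in format <format_name>"""
--     assert format_name in AVAILABLE_FORMATS['instance'], f'Format_name `{format_name}` unsupported for objects of category `instance`.'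
--     s, t = instance[0], instance[1]
--     header = (f"param M := {len(s)};  # Number of characters of the first string s\n"
--               f"param N := {len(t)};  # Number of characters of the second string t\n"
--               "param: STRINGS: S_STRING    T_STRING :=\n")
--     return (header + _rows(1, s, t))[:-1] + ";\nend;"
-- ===== Notes on version B (the rewrite author's own statement) =====
-- stated objective: alternative
-- what changed: Replaces A's indexed loop over range(max(M,N)) with j<M/j>=M branch tests and string += by a recursion that destructures both strings simultaneously (head row, recurse on the tails), with no indices or length comparisons in the row logic.
import Mathlib
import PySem

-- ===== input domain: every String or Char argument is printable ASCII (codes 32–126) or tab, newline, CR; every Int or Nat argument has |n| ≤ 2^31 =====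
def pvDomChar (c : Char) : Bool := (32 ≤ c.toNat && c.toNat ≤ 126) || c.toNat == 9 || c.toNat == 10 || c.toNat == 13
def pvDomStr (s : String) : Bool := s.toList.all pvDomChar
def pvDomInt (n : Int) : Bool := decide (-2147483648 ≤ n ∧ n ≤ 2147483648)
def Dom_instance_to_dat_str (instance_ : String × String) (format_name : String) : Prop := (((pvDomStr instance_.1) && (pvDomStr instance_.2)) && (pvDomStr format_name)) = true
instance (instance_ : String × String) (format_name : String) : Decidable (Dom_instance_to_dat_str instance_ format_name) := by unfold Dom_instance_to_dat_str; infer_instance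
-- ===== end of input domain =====

-- B replaces A's indexed loop over range(max(M,N)) (return value only; no side effects) by a
-- recursion that destructures both strings together, one row per step; same output format.


-- ===== PORT A =====
-- literal port of A over List Char (the Python assert is covered by Pre_)
def instance_to_dat_str (instance_ : String × String) (format_name : String) : String :=
  let s := instance_.1.toList
  let t := instance_.2.toList
  let M : Int := s.length
  let N : Int := t.length
  let output := "param M := ".toList ++ PySem.Int.toChars M ++ ";  # Number of characters of the first string s\n".toList
  let output := output ++ "param N := ".toList ++ PySem.Int.toChars N ++ ";  # Number of characters of the second string t\n".toList
  let output := output ++ "param: STRINGS: S_STRING    T_STRING :=\n".toList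
  let output := (PySem.List.pyRange 0 (max M N) 1).foldl (fun out j =>
    if j < M ∧ j < N then
      out ++ "            ".toList ++ PySem.Int.toChars (j + 1) ++ [' ', PySem.List.pyGetD s j ' ']
        ++ "             ".toList ++ [PySem.List.pyGetD t j ' '] ++ ['\n']
    else if M ≤ j then
      out ++ "            ".toList ++ PySem.Int.toChars (j + 1) ++ " .               ".toList
        ++ [PySem.List.pyGetD t j ' '] ++ ['\n']
    else if N ≤ j then
      out ++ "            ".toList ++ PySem.Int.toChars (j + 1) ++ [' ', PySem.List.pyGetD s j ' ']
        ++ "             .\n".toList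
    else out) output
  String.ofList (PySem.List.slice output none (some (-1)) ++ ";\nend;".toList)

-- ===== PORT B =====
-- port of B's helper _rows: simultaneous structural recursion on both strings
def pvRows (j : Int) (s t : List Char) : List Char :=
  match s, t with
  | [], [] => []
  | c :: s', d :: t' =>
      "            ".toList ++ PySem.Int.toChars j ++ [' ', c]
        ++ "             ".toList ++ [d] ++ ['\n'] ++ pvRows (j + 1) s' t'
  | c :: s', [] =>
      "            ".toList ++ PySem.Int.toChars j ++ [' ', c]
        ++ "             .\n".toList ++ pvRows (j + 1) s' []
  | [], d :: t' =>
      "            ".toList ++ PySem.Int.toChars j ++ " .               ".toList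
        ++ [d] ++ ['\n'] ++ pvRows (j + 1) [] t'
termination_by s.length + t.length

def instance_to_dat_str_alt (instance_ : String × String) (format_name : String) : String :=
  let s := instance_.1.toList
  let t := instance_.2.toList
  let header :=
    "param M := ".toList ++ PySem.Int.toChars (s.length : Int) ++ ";  # Number of characters of the first string s\n".toList
    ++ "param N := ".toList ++ PySem.Int.toChars (t.length : Int) ++ ";  # Number of characters of the second string t\n".toList
    ++ "param: STRINGS: S_STRING    T_STRING :=\n".toList
  String.ofList (PySem.List.slice (header ++ pvRows 1 s t) none (some (-1)) ++ ";\nend;".toList)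

-- ===== PRECONDITION & SPEC =====
-- A (and B) assert format_name ∈ AVAILABLE_FORMATS['instance']; Pre_ is exactly that set.
def Pre_instance_to_dat_str (instance_ : String × String) (format_name : String) : Prop :=
  format_name = "only_strings" ∨ format_name = "with_m_and_n" ∨ format_name = "gmpl_dat"
instance (instance_ : String × String) (format_name : String) : Decidable (Pre_instance_to_dat_str instance_ format_name) := by unfold Pre_instance_to_dat_str; infer_instance

def pvWitness_instance_to_dat_str : (String × String) × String := (("ab", "c"), "gmpl_dat")

def Spec_instance_to_dat_str (instance_ : String × String) (format_name : String) (out : String) : Prop := out = instance_to_dat_str_alt instance_ format_name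
instance (instance_ : String × String) (format_name : String) (out : String) : Decidable (Spec_instance_to_dat_str instance_ format_name out) := by unfold Spec_instance_to_dat_str; infer_instance

-- ===== CLAIM (what is proved, stated in full; the proofs are below) =====
def Claim_equal_instance_to_dat_str : Prop := ∀ (instance_ : String × String) (format_name : String), Dom_instance_to_dat_str instance_ format_name → Pre_instance_to_dat_str instance_ format_name → Spec_instance_to_dat_str instance_ format_name (instance_to_dat_str instance_ format_name)

-- ===== LEMMAS AND PROOFS =====

-- A's branching loop body, turned into an appended chunk per index
theorem foldl_body_eq_flatMap (s t : List Char) (r : List Int) (init : List Char) :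
    r.foldl (fun out j =>
      if j < (s.length : Int) ∧ j < (t.length : Int) then
        out ++ "            ".toList ++ PySem.Int.toChars (j + 1) ++ [' ', PySem.List.pyGetD s j ' ']
          ++ "             ".toList ++ [PySem.List.pyGetD t j ' '] ++ ['\n']
      else if (s.length : Int) ≤ j then
        out ++ "            ".toList ++ PySem.Int.toChars (j + 1) ++ " .               ".toList
          ++ [PySem.List.pyGetD t j ' '] ++ ['\n']
      else if (t.length : Int) ≤ j then
        out ++ "            ".toList ++ PySem.Int.toChars (j + 1) ++ [' ', PySem.List.pyGetD s j ' ']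
          ++ "             .\n".toList
      else out) init
    = init ++ r.flatMap (fun j =>
      if j < (s.length : Int) ∧ j < (t.length : Int) then
        "            ".toList ++ PySem.Int.toChars (j + 1) ++ [' ', PySem.List.pyGetD s j ' ']
          ++ "             ".toList ++ [PySem.List.pyGetD t j ' '] ++ ['\n']
      else if (s.length : Int) ≤ j then
        "            ".toList ++ PySem.Int.toChars (j + 1) ++ " .               ".toList
          ++ [PySem.List.pyGetD t j ' '] ++ ['\n']
      else if (t.length : Int) ≤ j then
        "            ".toList ++ PySem.Int.toChars (j + 1) ++ [' ', PySem.List.pyGetD s j ' ']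
          ++ "             .\n".toList
      else []) := by
  induction r generalizing init with
  | nil => simp
  | cons x r ih =>
    rw [List.foldl_cons, List.flatMap_cons, ih]
    split_ifs <;> simp

-- canonical row at relative index r with label offset a (used only by the proofs)
def rowB (s t : List Char) (a r : Nat) : List Char :=
  if r < s.length ∧ r < t.length then
    "            ".toList ++ PySem.Int.toChars ((a : Int) + (r : Int) + 1) ++ [' ', s.getD r ' ']
      ++ "             ".toList ++ [t.getD r ' '] ++ ['\n']
  else if s.length ≤ r then
    "            ".toList ++ PySem.Int.toChars ((a : Int) + (r : Int) + 1) ++ " .               ".toList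
      ++ [t.getD r ' '] ++ ['\n']
  else
    "            ".toList ++ PySem.Int.toChars ((a : Int) + (r : Int) + 1) ++ [' ', s.getD r ' ']
      ++ "             .\n".toList

theorem rowB_succ (s t : List Char) (a r : Nat) :
    rowB s t a (r + 1) = rowB s.tail t.tail (a + 1) r := by
  have hs : s.length ≤ s.tail.length + 1 := by cases s <;> simp
  have ht : t.length ≤ t.tail.length + 1 := by cases t <;> simp
  have hs' : r + 1 < s.length ↔ r < s.tail.length := by cases s <;> simp
  have ht' : r + 1 < t.length ↔ r < t.tail.length := by cases t <;> simp
  have hgs : s.getD (r + 1) ' ' = s.tail.getD r ' ' := by cases s <;> simp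
  have hgt : t.getD (r + 1) ' ' = t.tail.getD r ' ' := by cases t <;> simp
  have hlab : ((a : Int) + ((r + 1 : Nat) : Int) + 1) = (((a + 1 : Nat) : Int) + (r : Int) + 1) := by
    push_cast; ring
  have hle : s.length ≤ r + 1 ↔ s.tail.length ≤ r := by cases s <;> simp
  simp only [rowB, hs', ht', hgs, hgt, hlab, hle]

theorem rows_nil (t : List Char) (a : Nat) :
    pvRows ((a : Int) + 1) [] t = (List.range t.length).flatMap (rowB [] t a) := by
  induction t generalizing a with
  | nil => simp [pvRows]
  | cons d t' ih =>
    rw [pvRows]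
    have h1 : ((a : Int) + 1) + 1 = ((a + 1 : Nat) : Int) + 1 := by push_cast; ring
    rw [h1, ih (a + 1)]
    have htail : (List.range t'.length).flatMap (rowB [] t' (a + 1))
        = (List.range t'.length).flatMap (fun r => rowB [] (d :: t') a (r + 1)) := by
      apply List.flatMap_congr
      intro r _
      rw [rowB_succ]
      simp
    rw [htail, List.length_cons, List.range_succ_eq_map, List.flatMap_cons, List.flatMap_map]
    simp [rowB, Nat.succ_eq_add_one, List.append_assoc]

theorem rows_key (s : List Char) (t : List Char) (a : Nat) :
    pvRows ((a : Int) + 1) s t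
    = (List.range (max s.length t.length)).flatMap (rowB s t a) := by
  induction s generalizing t a with
  | nil =>
    rw [rows_nil t a]
    simp
  | cons c s' ih =>
    have h1 : ((a : Int) + 1) + 1 = ((a + 1 : Nat) : Int) + 1 := by push_cast; ring
    cases t with
    | nil =>
      rw [pvRows, h1, ih [] (a + 1)]
      have htail : (List.range s'.length).flatMap (rowB s' [] (a + 1))
          = (List.range s'.length).flatMap (fun r => rowB (c :: s') [] a (r + 1)) := by
        apply List.flatMap_congr
        intro r _
        rw [rowB_succ]
        simp
      simp only [List.length_nil, List.length_cons, Nat.max_eq_left (Nat.zero_le _)]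
      rw [htail, List.range_succ_eq_map, List.flatMap_cons, List.flatMap_map]
      simp [rowB, Nat.succ_eq_add_one, List.append_assoc]
    | cons d t' =>
      rw [pvRows, h1, ih t' (a + 1)]
      have htail : (List.range (max s'.length t'.length)).flatMap (rowB s' t' (a + 1))
          = (List.range (max s'.length t'.length)).flatMap (fun r => rowB (c :: s') (d :: t') a (r + 1)) := by
        apply List.flatMap_congr
        intro r _
        rw [rowB_succ]
        simp
      simp only [List.length_cons, Nat.succ_max_succ]
      rw [htail, List.range_succ_eq_map, List.flatMap_cons, List.flatMap_map]
      simp [rowB, Nat.succ_eq_add_one, List.append_assoc]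

-- A's flatMap over range(max(M,N)) IS B's recursion
theorem flatMap_eq_pvRows (s t : List Char) :
    (PySem.List.pyRange 0 (max (s.length : Int) (t.length : Int)) 1).flatMap (fun j =>
      if j < (s.length : Int) ∧ j < (t.length : Int) then
        "            ".toList ++ PySem.Int.toChars (j + 1) ++ [' ', PySem.List.pyGetD s j ' ']
          ++ "             ".toList ++ [PySem.List.pyGetD t j ' '] ++ ['\n']
      else if (s.length : Int) ≤ j then
        "            ".toList ++ PySem.Int.toChars (j + 1) ++ " .               ".toList
          ++ [PySem.List.pyGetD t j ' '] ++ ['\n']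
      else if (t.length : Int) ≤ j then
        "            ".toList ++ PySem.Int.toChars (j + 1) ++ [' ', PySem.List.pyGetD s j ' ']
          ++ "             .\n".toList
      else [])
    = pvRows 1 s t := by
  have h0 : pvRows 1 s t = pvRows (((0 : Nat) : Int) + 1) s t := by norm_num
  rw [h0, rows_key s t 0, PySem.List.pyRange_one]
  have hN : ((max (s.length : Int) (t.length : Int)) - 0).toNat = max s.length t.length := by omega
  rw [hN, List.flatMap_map]
  apply List.flatMap_congr
  intro r hr
  rw [List.mem_range] at hr
  simp only [zero_add]
  unfold rowB
  have hcast0 : (((0 : Nat) : Int) + (r : Int) + 1) = (r : Int) + 1 := by push_cast; ring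
  by_cases h1 : r < s.length ∧ r < t.length
  · rw [if_pos (show ((r : Int)) < (s.length : Int) ∧ ((r : Int)) < (t.length : Int) by
      exact ⟨by exact_mod_cast h1.1, by exact_mod_cast h1.2⟩), if_pos h1, hcast0]
    simp [PySem.List.pyGetD_natCast]
  · by_cases h2 : s.length ≤ r
    · rw [if_neg (show ¬ (((r : Int)) < (s.length : Int) ∧ ((r : Int)) < (t.length : Int)) by
        omega), if_neg h1,
        if_pos (show (s.length : Int) ≤ (r : Int) by exact_mod_cast h2), if_pos h2, hcast0]
      simp [PySem.List.pyGetD_natCast]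
    · have h3 : t.length ≤ r := by omega
      rw [if_neg (show ¬ (((r : Int)) < (s.length : Int) ∧ ((r : Int)) < (t.length : Int)) by
        omega), if_neg h1,
        if_neg (show ¬ ((s.length : Int) ≤ (r : Int)) by omega), if_neg h2,
        if_pos (show (t.length : Int) ≤ (r : Int) by exact_mod_cast h3), hcast0]
      simp [PySem.List.pyGetD_natCast]

-- ===== VERDICT (by name: the statement is the Claim_ definition above) =====
theorem instance_to_dat_str_spec : Claim_equal_instance_to_dat_str := by
  intro instance_ format_name _ _
  unfold Spec_instance_to_dat_str instance_to_dat_str instance_to_dat_str_alt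
  simp only []
  rw [foldl_body_eq_flatMap, flatMap_eq_pvRows]
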